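-- pv_equiv track=rewrite | github.com/mattkistner/CS-1301 | HW04.py | fieldTripRoster
-- ===== SOURCE A (Python) =====
-- def fieldTripRoster(friendList):
--     nameList = []
--     for item in friendList:
--         for string in item:
--             if string in nameList:
--                 continue
--             if type(string) == str:
--                 nameList.append(string)
--             else:
--                 continue
--     nameList.sort()
--     return nameList
--     pass
-- ===== SOURCE B (Python) =====
-- def fieldTripRoster(friendList):
--     # Gather all strings (duplicates allowed), sort, then remove adjacent
--     # duplicates in one linear pass over the sorted list.
--     names = []
--     for item in friendList:
--         for s in item:
--             if type(s) == str:
--                 names.append(s)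
--     names.sort()
--     result = []
--     for s in names:
--         if not result or result[-1] != s:
--             result.append(s)
--     return result
-- ===== Notes on version B (the rewrite author's own statement) =====
-- stated objective: faster
-- what changed: Dedup via membership scans during collection is replaced by collecting everything, sorting once, and removing adjacent duplicates in one linear pass.
import Mathlib
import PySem

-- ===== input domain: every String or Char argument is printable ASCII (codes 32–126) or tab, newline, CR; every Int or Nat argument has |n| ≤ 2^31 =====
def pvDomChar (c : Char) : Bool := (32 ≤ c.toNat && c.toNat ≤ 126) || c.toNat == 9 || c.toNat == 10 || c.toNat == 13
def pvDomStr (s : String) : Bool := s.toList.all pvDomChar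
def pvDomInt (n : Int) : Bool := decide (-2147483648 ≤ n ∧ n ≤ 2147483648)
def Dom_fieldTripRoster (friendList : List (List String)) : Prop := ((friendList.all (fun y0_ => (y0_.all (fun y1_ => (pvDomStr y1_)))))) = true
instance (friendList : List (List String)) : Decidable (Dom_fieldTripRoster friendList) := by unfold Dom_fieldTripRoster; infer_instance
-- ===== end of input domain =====

-- B replaces A's membership-scan-during-collection (quadratic) by collect-all,
-- sort once, then one adjacent-duplicate-removal pass over the sorted list.

-- ===== PORT A =====
-- A: gather each string not already collected (membership scan), then sort in place.
-- (Python's `type(string) == str` test is always true here: every element is a String.)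
def fieldTripRoster (friendList : List (List String)) : List String :=
  let nameList : List String :=
    friendList.foldl (fun nameList item =>
      item.foldl (fun nameList string =>
        if string ∈ nameList then nameList          -- 'continue'
        else nameList ++ [string]) nameList) []     -- 'nameList.append(string)'
  PySem.List.sorted nameList (fun x => x) false     -- 'nameList.sort()'

-- ===== PORT B =====
-- B: append everything, sort, then keep an element only if it differs from result[-1].
def fieldTripRoster_alt (friendList : List (List String)) : List String :=
  let names : List String :=
    friendList.foldl (fun names item =>
      item.foldl (fun names s => names ++ [s]) names) []
  let sortedNames := PySem.List.sorted names (fun x => x) false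
  sortedNames.foldl (fun result s =>
    match result.getLast? with
    | none => [s]                                       -- 'not result'
    | some t => if t ≠ s then result ++ [s] else result) []

-- ===== PRECONDITION & SPEC =====
def Spec_fieldTripRoster (friendList : List (List String)) (out : List String) : Prop := out = fieldTripRoster_alt friendList
instance (friendList : List (List String)) (out : List String) : Decidable (Spec_fieldTripRoster friendList out) := by unfold Spec_fieldTripRoster; infer_instance

-- ===== CLAIM (what is proved, stated in full; the proofs are below) =====
def Claim_equal_fieldTripRoster : Prop := ∀ (friendList : List (List String)), Dom_fieldTripRoster friendList → Spec_fieldTripRoster friendList (fieldTripRoster friendList)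

-- ===== LEMMAS AND PROOFS =====

-- The adjacent-dedup step of B's final pass, named for the lemmas below.
def pvAdjStep (result : List String) (s : String) : List String :=
  match result.getLast? with
  | none => [s]
  | some t => if t ≠ s then result ++ [s] else result

-- In a strictly increasing list, the last element bounds every member.
lemma pv_last_max : ∀ (l : List String) (t : String), l.Pairwise (· < ·) →
    l.getLast? = some t → ∀ a ∈ l, a ≤ t := by
  intro l
  induction l with
  | nil => intro t _ h; simp at h
  | cons x rest ih =>
    intro t hpw hlast a ha
    rcases List.pairwise_cons.mp hpw with ⟨hx, hrest⟩
    cases rest with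
    | nil =>
      simp at hlast ha
      simp [hlast ▸ ha]
    | cons y r =>
      have hlast' : (y :: r).getLast? = some t := by
        simpa [List.getLast?_cons_cons] using hlast
      rcases ha with _ | ha'
      · exact le_of_lt (lt_of_lt_of_le (hx t (List.mem_of_getLast? hlast'))
          (le_refl t))
      · exact ih t hrest hlast' a (by assumption)

-- Invariant of B's adjacent-dedup fold over a (≤)-sorted list.
lemma pv_adj_inv : ∀ (xs acc : List String), acc.Pairwise (· < ·) →
    (∀ a ∈ acc, ∀ b ∈ xs, a ≤ b) → xs.Pairwise (· ≤ ·) →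
    (xs.foldl pvAdjStep acc).Pairwise (· < ·) ∧
      (∀ a, a ∈ xs.foldl pvAdjStep acc ↔ a ∈ acc ∨ a ∈ xs) := by
  intro xs
  induction xs with
  | nil => intro acc hacc _ _; exact ⟨hacc, fun a => by simp⟩
  | cons x xs ih =>
    intro acc hacc hle hxs
    rcases List.pairwise_cons.mp hxs with ⟨hx_le, hxs'⟩
    rw [List.foldl_cons]
    rcases h : acc.getLast? with _ | t
    · -- acc = []
      have haccnil : acc = [] := List.getLast?_eq_none_iff.mp h
      subst haccnil
      have step1 : pvAdjStep [] x = [x] := by simp [pvAdjStep]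
      rw [step1]
      have := ih [x] (by simp) (by intro a ha b hb; simp at ha; exact ha ▸ hx_le b hb) hxs'
      refine ⟨this.1, fun a => ?_⟩
      rw [this.2 a]; simp
    · -- acc has last element t
      have htmem : t ∈ acc := List.mem_of_getLast? h
      have htmax : ∀ a ∈ acc, a ≤ t := pv_last_max acc t hacc h
      by_cases hts : t = x
      · have step1 : pvAdjStep acc x = acc := by simp [pvAdjStep, h, hts]
        rw [step1]
        have := ih acc hacc (fun a ha b hb => hle a ha b (List.mem_cons_of_mem _ hb)) hxs'
        refine ⟨this.1, fun a => ?_⟩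
        rw [this.2 a]
        constructor
        · rintro (ha | ha)
          · exact Or.inl ha
          · exact Or.inr (List.mem_cons_of_mem _ ha)
        · rintro (ha | ha)
          · exact Or.inl ha
          · rcases List.mem_cons.mp ha with rfl | ha'
            · exact Or.inl (hts ▸ htmem)
            · exact Or.inr ha'
      · have step1 : pvAdjStep acc x = acc ++ [x] := by simp [pvAdjStep, h, hts]
        rw [step1]
        have hlt : ∀ a ∈ acc, a < x := by
          intro a ha
          exact lt_of_le_of_lt (htmax a ha)
            (lt_of_le_of_ne (hle t htmem x (List.mem_cons_self)) hts)
        have hacc' : (acc ++ [x]).Pairwise (· < ·) := by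
          rw [List.pairwise_append]
          exact ⟨hacc, by simp, by intro a ha b hb; simp at hb; exact hb ▸ hlt a ha⟩
        have hle' : ∀ a ∈ acc ++ [x], ∀ b ∈ xs, a ≤ b := by
          intro a ha b hb
          rcases List.mem_append.mp ha with ha' | ha'
          · exact hle a ha' b (List.mem_cons_of_mem _ hb)
          · simp at ha'; exact ha' ▸ hx_le b hb
        have := ih (acc ++ [x]) hacc' hle' hxs'
        refine ⟨this.1, fun a => ?_⟩
        rw [this.2 a]
        simp [or_assoc]

-- The loop body of A's collection pass is exactly PySem.Set.add.
lemma pv_a_step_eq (acc : List String) (s : String) :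
    (if s ∈ acc then acc else acc ++ [s]) = PySem.Set.add acc s := by
  simp [PySem.Set.add, PySem.Set.contains]

-- A's collected nameList is set-of-first-occurrences of the flattened input.
lemma pv_a_collect (fl : List (List String)) :
    fl.foldl (fun nameList item =>
      item.foldl (fun nameList string =>
        if string ∈ nameList then nameList else nameList ++ [string]) nameList) []
      = PySem.Set.ofList fl.flatten := by
  rw [← List.foldl_flatten, PySem.Set.ofList_eq_foldl]
  exact PySem.List.foldl_congr_mem _ _ _ _ (fun acc x _ => pv_a_step_eq acc x)

-- B's collected names list is the flattened input itself.
lemma pv_b_collect (fl : List (List String)) :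
    fl.foldl (fun names item => item.foldl (fun names s => names ++ [s]) names) []
      = fl.flatten := by
  rw [← List.foldl_flatten]
  simpa using PySem.List.foldl_append_singleton_eq_self fl.flatten []

-- ===== VERDICT (by name: the statement is the Claim_ definition above) =====
theorem fieldTripRoster_spec : Claim_equal_fieldTripRoster := by
  intro fl _
  unfold Spec_fieldTripRoster fieldTripRoster fieldTripRoster_alt
  rw [pv_a_collect, pv_b_collect]
  set L := fl.flatten with hL
  set S := PySem.List.sorted L (fun x => x) false with hS
  have hSsorted : S.Pairwise (· ≤ ·) := PySem.List.sorted_pairwise L (fun x => x)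
  have hfold : S.foldl (fun result s =>
      match result.getLast? with
      | none => [s]
      | some t => if t ≠ s then result ++ [s] else result) [] = S.foldl pvAdjStep [] := by
    rfl
  rw [hfold]
  have hinv := pv_adj_inv S [] (by simp) (by simp) hSsorted
  have hnodup : (S.foldl pvAdjStep []).Nodup := hinv.1.imp (fun h => ne_of_lt h)
  have hmem : ∀ a, a ∈ S.foldl pvAdjStep [] ↔ a ∈ PySem.Set.ofList L := by
    intro a
    rw [hinv.2 a, PySem.Set.mem_ofList]
    simp [hS, PySem.List.mem_sorted]
  have hperm : (S.foldl pvAdjStep []).Perm (PySem.Set.ofList L) :=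
    (List.perm_ext_iff_of_nodup hnodup (PySem.Set.nodup_ofList L)).mpr hmem
  exact PySem.List.sorted_eq_of_perm_of_pairwise_lt _ _ (fun x => x) hperm hinv.1
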